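-- pv_equiv track=rewrite | github.com/pinax/pinax | projects/pinax/site-packages/gdata.py-1.0.13/src/gdata/auth.py | GetCaptchChallenge
-- ===== SOURCE A (Python) =====
-- def GetCaptchChallenge(http_body,
--     captcha_base_url='http://www.google.com/accounts/'):
--   """Returns the URL and token for a CAPTCHA challenge issued bu the server.
--
--   Args:
--     http_body: str The body of the HTTP response from the server which
--         contains the CAPTCHA challenge.
--     captcha_base_url: str This function returns a full URL for viewing the
--         challenge image which is built from the server's response. This
--         base_url is used as the beginning of the URL because the server
--         only provides the end of the URL. For example the server provides
--         'Captcha?ctoken=Hi...N' and the URL for the image is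
--         'http://www.google.com/accounts/Captcha?ctoken=Hi...N'
--
--   Returns:
--     A dictionary containing the information needed to repond to the CAPTCHA
--     challenge, the image URL and the ID token of the challenge. The
--     dictionary is in the form:
--     {'token': string identifying the CAPTCHA image,
--      'url': string containing the URL of the image}
--     Returns None if there was no CAPTCHA challenge in the response.
--   """
--   contains_captcha_challenge = False
--   captcha_parameters = {}
--   for response_line in http_body.splitlines():
--     if response_line.startswith('Error=CaptchaRequired'):
--       contains_captcha_challenge = True
--     elif response_line.startswith('CaptchaToken='):
--       # Strip off the leading CaptchaToken=
--       captcha_parameters['token'] = response_line[13:]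
--     elif response_line.startswith('CaptchaUrl='):
--       captcha_parameters['url'] = '%s%s' % (captcha_base_url,
--           response_line[11:])
--   if contains_captcha_challenge:
--     return captcha_parameters
--   else:
--     return None
-- ===== SOURCE B (Python) =====
-- def GetCaptchChallenge(http_body,
--     captcha_base_url='http://www.google.com/accounts/'):
--   lines = http_body.splitlines()
--   if not any(line.startswith('Error=CaptchaRequired') for line in lines):
--     return None
--   prefixes = [('CaptchaToken=', 'token', ''), ('CaptchaUrl=', 'url', captcha_base_url)]
--   return dict((key, base + line[len(prefix):])
--               for line in lines
--               for prefix, key, base in prefixes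
--               if line.startswith(prefix))
-- ===== Notes on version B (the rewrite author's own statement) =====
-- stated objective: alternative
-- what changed: A's single flag-carrying loop with three prefix branches is replaced by an any() scan for the Error=CaptchaRequired marker plus a prefix-table-driven dict() comprehension that assembles the result pairs.
import Mathlib
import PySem

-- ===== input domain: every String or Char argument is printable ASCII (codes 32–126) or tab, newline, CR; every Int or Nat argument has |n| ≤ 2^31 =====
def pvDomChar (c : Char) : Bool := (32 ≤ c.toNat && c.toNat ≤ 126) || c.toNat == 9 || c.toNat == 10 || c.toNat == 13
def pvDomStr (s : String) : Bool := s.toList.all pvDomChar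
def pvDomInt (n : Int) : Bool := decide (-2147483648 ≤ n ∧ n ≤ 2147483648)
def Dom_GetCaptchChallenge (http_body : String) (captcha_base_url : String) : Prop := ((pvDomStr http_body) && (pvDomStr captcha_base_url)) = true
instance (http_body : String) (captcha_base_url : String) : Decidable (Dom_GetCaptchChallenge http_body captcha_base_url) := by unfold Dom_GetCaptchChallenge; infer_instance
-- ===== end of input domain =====

-- B replaces A's single flag-carrying loop by an `any` scan for the challenge marker plus a
-- prefix-table-driven dict comprehension (objective: alternative decomposition, same cost).

-- ===== PORT A =====
-- literal port of A: one fold over the lines carrying (contains_captcha_challenge, captcha_parameters)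
def GetCaptchChallenge (http_body : String) (captcha_base_url : String) : Option (List (String × String)) :=
  let st := (PySem.Str.splitlines http_body).foldl
    (fun (st : Bool × PySem.Dict String String) line =>
      if PySem.Str.startswith line "Error=CaptchaRequired" then (true, st.2)
      else if PySem.Str.startswith line "CaptchaToken=" then
        (st.1, st.2.insert "token" (PySem.Str.slice line (some 13) none))
      else if PySem.Str.startswith line "CaptchaUrl=" then
        (st.1, st.2.insert "url" (captcha_base_url ++ PySem.Str.slice line (some 11) none))
      else st)
    (false, PySem.Dict.empty)
  if st.1 then some st.2.items else none

-- ===== PORT B =====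
-- literal port of Source B: `any` over the lines, then dict(generator) — the generator is a
-- flatMap over (line, matching table entry) pairs, folded into a Dict by insertion.
def GetCaptchChallenge_alt (http_body : String) (captcha_base_url : String) : Option (List (String × String)) :=
  let lines := PySem.Str.splitlines http_body
  if !(lines.any (fun line => PySem.Str.startswith line "Error=CaptchaRequired")) then none
  else
    let prefixes : List (String × String × String) :=
      [("CaptchaToken=", "token", ""), ("CaptchaUrl=", "url", captcha_base_url)]
    let pairs := lines.flatMap (fun line =>
      (prefixes.filter (fun p => PySem.Str.startswith line p.1)).map
        (fun p => (p.2.1, p.2.2 ++ PySem.Str.slice line (some ((PySem.Str.len p.1 : Int))) none)))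
    some ((pairs.foldl (fun (d : PySem.Dict String String) kv => d.insert kv.1 kv.2)
      PySem.Dict.empty).items)

-- ===== PRECONDITION & SPEC =====
def Spec_GetCaptchChallenge (http_body : String) (captcha_base_url : String) (out : Option (List (String × String))) : Prop := out = GetCaptchChallenge_alt http_body captcha_base_url
instance (http_body : String) (captcha_base_url : String) (out : Option (List (String × String))) : Decidable (Spec_GetCaptchChallenge http_body captcha_base_url out) := by unfold Spec_GetCaptchChallenge; infer_instance

-- ===== CLAIM (what is proved, stated in full; the proofs are below) =====
def Claim_equal_GetCaptchChallenge : Prop := ∀ (http_body : String) (captcha_base_url : String), Dom_GetCaptchChallenge http_body captcha_base_url → Spec_GetCaptchChallenge http_body captcha_base_url (GetCaptchChallenge http_body captcha_base_url)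

-- ===== LEMMAS AND PROOFS =====

-- the three line prefixes are mutually exclusive: no line starts with two of them
theorem pv_prefix_excl (l p q : String)
    (hpq : ¬ (p.toList <+: q.toList) ∧ ¬ (q.toList <+: p.toList))
    (hp : PySem.Str.startswith l p = true) : PySem.Str.startswith l q = false := by
  rw [PySem.Str.startswith_eq] at hp ⊢
  rw [PySem.Chars.startswith_iff] at hp
  by_contra h
  rw [Bool.not_eq_false, PySem.Chars.startswith_iff] at h
  rcases List.prefix_or_prefix_of_prefix hp h with hh | hh
  · exact hpq.1 hh
  · exact hpq.2 hh

-- one step of A's loop = (flag ∨ error-marker test, one table-driven batch of inserts)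
theorem pv_step_eq (captcha_base_url l : String) (b : Bool) (d : PySem.Dict String String) :
    (if PySem.Str.startswith l "Error=CaptchaRequired" then ((true : Bool), d)
      else if PySem.Str.startswith l "CaptchaToken=" then
        (b, d.insert "token" (PySem.Str.slice l (some 13) none))
      else if PySem.Str.startswith l "CaptchaUrl=" then
        (b, d.insert "url" (captcha_base_url ++ PySem.Str.slice l (some 11) none))
      else (b, d))
    = (b || PySem.Str.startswith l "Error=CaptchaRequired",
       List.foldl (fun (d : PySem.Dict String String) kv => d.insert kv.1 kv.2) d
        (([("CaptchaToken=", "token", ""), ("CaptchaUrl=", "url", captcha_base_url)].filter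
            (fun (p : String × String × String) => PySem.Str.startswith l p.1)).map
          (fun p => (p.2.1, p.2.2 ++ PySem.Str.slice l (some ((PySem.Str.len p.1 : Int))) none)))) := by
  have htok : "CaptchaToken=".length = 13 := by decide
  have hurl : "CaptchaUrl=".length = 11 := by decide
  by_cases he : PySem.Str.startswith l "Error=CaptchaRequired" = true
  · have h1 : PySem.Str.startswith l "CaptchaToken=" = false :=
      pv_prefix_excl l _ _ (by constructor <;> decide) he
    have h2 : PySem.Str.startswith l "CaptchaUrl=" = false :=
      pv_prefix_excl l _ _ (by constructor <;> decide) he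
    simp at he h1 h2
    simp [he, h1, h2]
  · by_cases h1 : PySem.Str.startswith l "CaptchaToken=" = true
    · have h2 : PySem.Str.startswith l "CaptchaUrl=" = false :=
        pv_prefix_excl l _ _ (by constructor <;> decide) h1
      simp at he h1 h2
      simp [he, h1, h2, String.empty_append, htok]
    · by_cases h2 : PySem.Str.startswith l "CaptchaUrl=" = true
      · simp at he h1 h2
        simp [he, h1, h2, hurl]
      · simp at he h1 h2
        simp [he, h1, h2]

-- A's loop = (any-scan, table-driven insert fold), for any starting state
theorem pv_loop_eq (captcha_base_url : String) (lines : List String)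
    (b : Bool) (d : PySem.Dict String String) :
    lines.foldl
      (fun (st : Bool × PySem.Dict String String) line =>
        if PySem.Str.startswith line "Error=CaptchaRequired" then (true, st.2)
        else if PySem.Str.startswith line "CaptchaToken=" then
          (st.1, st.2.insert "token" (PySem.Str.slice line (some 13) none))
        else if PySem.Str.startswith line "CaptchaUrl=" then
          (st.1, st.2.insert "url" (captcha_base_url ++ PySem.Str.slice line (some 11) none))
        else st) (b, d)
    = (b || lines.any (fun line => PySem.Str.startswith line "Error=CaptchaRequired"),
       List.foldl (fun (d : PySem.Dict String String) kv => d.insert kv.1 kv.2) d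
        (lines.flatMap (fun line =>
          (([("CaptchaToken=", "token", ""), ("CaptchaUrl=", "url", captcha_base_url)].filter
              (fun (p : String × String × String) => PySem.Str.startswith line p.1)).map
            (fun p => (p.2.1, p.2.2 ++ PySem.Str.slice line (some ((PySem.Str.len p.1 : Int))) none)))))) := by
  induction lines generalizing b d with
  | nil => simp
  | cons l t ih =>
    rw [List.foldl_cons, pv_step_eq, ih]
    simp [List.foldl_append, Bool.or_assoc]
-- ===== VERDICT (by name: the statement is the Claim_ definition above) =====
theorem GetCaptchChallenge_spec : Claim_equal_GetCaptchChallenge := by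
  intro http_body captcha_base_url _
  unfold Spec_GetCaptchChallenge GetCaptchChallenge GetCaptchChallenge_alt
  simp only [pv_loop_eq, Bool.false_or]
  cases h : (PySem.Str.splitlines http_body).any
      (fun line => PySem.Str.startswith line "Error=CaptchaRequired") <;> simp
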